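-- pv_equiv track=rewrite | github.com/faeller/osc-cli-refactor | osc/completion.py | _abbreviate_projects
-- ===== SOURCE A (Python) =====
-- def _get_common_prefix(iterable):
--     """
--     Return the longest prefix all items in the iterable have in common.
--     """
--     iterable = sorted(iterable)
--
--     result = ""
--     if not iterable:
--         return result
--
--     first = iterable[0]
--     last = iterable[-1]
--     for letter_first, letter_last in zip(first, last):
--         if letter_first != letter_last:
--             break
--         result += letter_first
--     return result
--
-- def _abbreviate_projects(entries, prefix):
--     """
--     Abbreviate names of some rpojects to their namespace prefixes in order to cut down
--     the number of suggested entries and make the completion easier to use.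
--
--     NOTE:
--     The function normally returns multiple values to trigger further completion.
--     Returning a single value means that the completion is over.
--     """
--
--     # filter out entries that do not match the prefix
--     entries = [i for i in entries if i.startswith(prefix)]
--
--     if not entries:
--         return []
--
--     # abbreviated (incomplete) entries that contain right amount of information for the current completion
--     abbreviated_entries = set()
--
--     # find the longest common prefix
--     common_prefix = _get_common_prefix(entries)
--
--     # we're iterating through a copy because we're removing entries
--     for entry in entries.copy():
--         head = common_prefix
--         tail = entry[len(common_prefix):]
--
--         if ":" not in tail:
--             # keep entries that do not have any more namespaces
--             continue
--
--         # remove the entry, it's going to be replaced with the abbreviated form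
--         entries.remove(entry)
--
--         # keep the entry up to the next ':'
--         abbreviated_entry = head + tail.split(":")[0] + ":"
--         abbreviated_entries.add(abbreviated_entry)
--
--     entries += sorted(abbreviated_entries)
--     return entries
-- ===== SOURCE B (Python) =====
-- def _abbreviate_projects(entries, prefix):
--     # min/max instead of a full sort for the common
--     # prefix, and two comprehensions instead of the copy/remove loop (no mutation).
--     entries = [e for e in entries if e.startswith(prefix)]
--     if not entries:
--         return []
--
--     lo, hi = min(entries), max(entries)
--     cp_chars = []
--     for a, b in zip(lo, hi):
--         if a != b:
--             break
--         cp_chars.append(a)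
--     cp = ''.join(cp_chars)
--     n = len(cp)
--
--     kept = [e for e in entries if ':' not in e[n:]]
--     abbrev = sorted({cp + e[n:].split(':')[0] + ':' for e in entries if ':' in e[n:]})
--     return kept + abbrev
-- ===== Notes on version B (the rewrite author's own statement) =====
-- stated objective: alternative
-- what changed: B computes the common prefix from min(entries)/max(entries) instead of sorting the whole list, and replaces the copy/remove mutation loop by two filtering passes (kept entries in order, plus a sorted set of abbreviations), with no list mutation.
import Mathlib
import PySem

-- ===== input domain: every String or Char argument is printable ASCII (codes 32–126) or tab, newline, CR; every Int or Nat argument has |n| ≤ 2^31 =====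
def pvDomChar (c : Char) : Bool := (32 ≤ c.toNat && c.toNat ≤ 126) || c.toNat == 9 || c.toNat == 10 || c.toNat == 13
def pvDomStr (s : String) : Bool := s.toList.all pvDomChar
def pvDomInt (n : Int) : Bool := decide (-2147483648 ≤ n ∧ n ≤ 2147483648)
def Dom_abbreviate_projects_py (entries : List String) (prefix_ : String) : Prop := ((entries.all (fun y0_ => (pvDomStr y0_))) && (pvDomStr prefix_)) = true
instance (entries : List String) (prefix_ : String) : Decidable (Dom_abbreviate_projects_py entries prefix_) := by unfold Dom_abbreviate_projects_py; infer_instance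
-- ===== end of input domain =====

-- B computes the common prefix from min/max instead of sorting and replaces the copy/remove
-- mutation loop by two filtering passes (objective: alternative, mutation-free decomposition).


-- ===== PORT A =====
-- the 'for letter_first, letter_last in zip(first, last): if … break; result += …'
-- loop, appearing verbatim in both Pythons (A's helper and B's)
def pvZipPrefix : List Char → List Char → List Char
  | a :: as, b :: bs => if a = b then a :: pvZipPrefix as bs else []
  | _, _ => []

-- _get_common_prefix (A): sort, take first and last, zip them (result kept as List Char)
def pvGetCommonPrefixA (iterable : List String) : List Char :=
  let it := PySem.List.sorted iterable (fun x => x) false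
  match it with
  | [] => []
  | f :: _ =>
    -- first = iterable[0]; last = iterable[-1] (in range: the list is nonempty)
    pvZipPrefix f.toList ((PySem.List.pyGetD it (-1) "").toList)

def abbreviate_projects_py (entries : List String) (prefix_ : String) : List String :=
  let entries := entries.filter (fun i => PySem.Str.startswith i prefix_)
  if entries.isEmpty then []
  else
    let common_prefix := pvGetCommonPrefixA entries
    -- the for-loop over entries.copy(), mutating entries and abbreviated_entries
    let st := entries.foldl (fun (st : List String × PySem.Set String) entry =>
        -- tail = entry[len(common_prefix):]  (nonnegative start slice = drop, exact)
        let tail := entry.toList.drop common_prefix.length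
        if PySem.Chars.isIn [':'] tail = false then st
        else
          -- entries.remove(entry): entry is a member of st.1 here (it comes from the
          -- copy and only earlier occurrences were removed), so removing the first
          -- occurrence is List.erase (PySem.List.remove?_eq_some_erase)
          (st.1.erase entry,
           PySem.Set.add st.2
             (String.ofList (common_prefix ++ (PySem.Chars.splitOn tail [':']).headD [] ++ [':'])))
      ) (entries, PySem.Set.empty)
    st.1 ++ PySem.List.sorted st.2 (fun x => x) false

-- ===== PORT B =====
def abbreviate_projects_py_alt (entries : List String) (prefix_ : String) : List String :=
  let entries := entries.filter (fun e => PySem.Str.startswith e prefix_)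
  if entries.isEmpty then []
  else
    -- lo, hi = min(entries), max(entries)  (nonempty: the defaults are unreachable)
    let lo := (PySem.List.min? entries (fun x => x)).getD ""
    let hi := (PySem.List.max? entries (fun x => x)).getD ""
    let cp := pvZipPrefix lo.toList hi.toList
    let n := cp.length
    let kept := entries.filter (fun e => PySem.Chars.isIn [':'] (e.toList.drop n) = false)
    let abbrevs := PySem.List.sorted
      (PySem.Set.ofList ((entries.filter (fun e => PySem.Chars.isIn [':'] (e.toList.drop n))).map
        (fun e => String.ofList (cp ++ (PySem.Chars.splitOn (e.toList.drop n) [':']).headD [] ++ [':']))))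
      (fun x => x) false
    kept ++ abbrevs

-- ===== PRECONDITION & SPEC =====
def Spec_abbreviate_projects_py (entries : List String) (prefix_ : String) (out : List String) : Prop := out = abbreviate_projects_py_alt entries prefix_
instance (entries : List String) (prefix_ : String) (out : List String) : Decidable (Spec_abbreviate_projects_py entries prefix_ out) := by unfold Spec_abbreviate_projects_py; infer_instance

-- ===== CLAIM (what is proved, stated in full; the proofs are below) =====
def Claim_equal_abbreviate_projects_py : Prop := ∀ (entries : List String) (prefix_ : String), Dom_abbreviate_projects_py entries prefix_ → Spec_abbreviate_projects_py entries prefix_ (abbreviate_projects_py entries prefix_)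

-- ===== LEMMAS AND PROOFS =====

-- in a ≤-pairwise (i.e. sorted) list every element is ≤ the last one
theorem pv_pairwise_le_getLast :
    ∀ (l : List String), l.Pairwise (· ≤ ·) → ∀ (hne : l ≠ []) (y : String), y ∈ l → y ≤ l.getLast hne := by
  intro l
  induction l with
  | nil => simp
  | cons a t ih =>
    intro h _ y hy
    by_cases ht : t = []
    · subst ht
      simp at hy
      subst hy
      simp
    · rw [List.getLast_cons ht]
      rcases List.mem_cons.mp hy with rfl | hyt
      · exact (List.pairwise_cons.mp h).1 _ (List.getLast_mem ht)
      · exact ih (List.pairwise_cons.mp h).2 ht y hyt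

-- head of sorted(entries) is min(entries)
theorem pv_sorted_head_eq_min (entries : List String) (f : String) (t : List String)
    (hs : PySem.List.sorted entries (fun x => x) false = f :: t) :
    (PySem.List.min? entries (fun x => x)).getD "" = f := by
  obtain ⟨m, hm⟩ : ∃ m, PySem.List.min? entries (fun x => x) = some m := by
    rcases h : PySem.List.min? entries (fun x => x) with _ | m
    · exfalso
      have he : entries = [] := (PySem.List.min?_eq_none_iff entries (fun x => x)).mp h
      rw [he] at hs
      have := (PySem.List.sorted_eq_nil_iff ([] : List String) (fun x => x) false).mpr rfl
      simp [this] at hs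
    · exact ⟨m, rfl⟩
  rw [hm]
  have hmem : m ∈ entries := PySem.List.min?_mem hm
  have hfm : f ∈ entries := by
    have : f ∈ PySem.List.sorted entries (fun x => x) false := by simp [hs]
    exact (PySem.List.mem_sorted entries (fun x => x) false f).mp this
  exact le_antisymm (PySem.List.min?_isMin hm f hfm) (PySem.List.key_head_sorted_le entries (fun x => x) hs m hmem)

-- last of sorted(entries) is max(entries)
theorem pv_sorted_last_eq_max (entries : List String) (f : String) (t : List String)
    (hs : PySem.List.sorted entries (fun x => x) false = f :: t) :
    PySem.List.pyGetD (PySem.List.sorted entries (fun x => x) false) (-1) ""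
      = (PySem.List.max? entries (fun x => x)).getD "" := by
  have hne : PySem.List.sorted entries (fun x => x) false ≠ [] := by simp [hs]
  rw [PySem.List.pyGetD_neg_one _ _ hne]
  obtain ⟨m, hm⟩ : ∃ m, PySem.List.max? entries (fun x => x) = some m := by
    rcases h : PySem.List.max? entries (fun x => x) with _ | m
    · exfalso
      have he : entries = [] := (PySem.List.max?_eq_none_iff entries (fun x => x)).mp h
      rw [he] at hs
      have := (PySem.List.sorted_eq_nil_iff ([] : List String) (fun x => x) false).mpr rfl
      simp [this] at hs
    · exact ⟨m, rfl⟩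
  rw [hm]
  have hg : (PySem.List.sorted entries (fun x => x) false).getLast hne ∈ entries := by
    exact (PySem.List.mem_sorted entries (fun x => x) false _).mp (List.getLast_mem hne)
  have h1 : (PySem.List.sorted entries (fun x => x) false).getLast hne ≤ m :=
    PySem.List.max?_isMax hm _ hg
  have h2 : m ≤ (PySem.List.sorted entries (fun x => x) false).getLast hne :=
    pv_pairwise_le_getLast _ (PySem.List.sorted_pairwise entries (fun x => x)) hne m
      ((PySem.List.mem_sorted entries (fun x => x) false m).mpr (PySem.List.max?_mem hm))
  exact le_antisymm h1 h2

-- A's helper computes B's cp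
theorem pv_cp_eq (entries : List String) :
    pvGetCommonPrefixA entries
      = pvZipPrefix ((PySem.List.min? entries (fun x => x)).getD "").toList
                    ((PySem.List.max? entries (fun x => x)).getD "").toList := by
  unfold pvGetCommonPrefixA
  cases hs : PySem.List.sorted entries (fun x => x) false with
  | nil =>
    have he : entries = [] := (PySem.List.sorted_eq_nil_iff entries (fun x => x) false).mp hs
    subst he
    simp [PySem.List.min?, PySem.List.max?, pvZipPrefix]
  | cons f t =>
    simp only
    rw [pv_sorted_head_eq_min entries f t hs, ← hs, pv_sorted_last_eq_max entries f t hs]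

-- A's pair-state fold splits into its two independent components
theorem pv_fold_split (l : List String) (P : String → Bool) (f : String → String)
    (a : List String) (b : PySem.Set String) :
    l.foldl (fun (st : List String × PySem.Set String) e =>
        if P e = false then st else (st.1.erase e, PySem.Set.add st.2 (f e))) (a, b)
      = (l.foldl (fun a e => if P e = false then a else a.erase e) a,
         l.foldl (fun b e => if P e = false then b else PySem.Set.add b (f e)) b) := by
  induction l generalizing a b with
  | nil => rfl
  | cons e t ih =>
    simp only [List.foldl_cons]
    by_cases h : P e = false <;> simp [h, ih]

-- the remove loop leaves exactly the entries without ':' in their tail, in order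
theorem pv_erase_loop (P : String → Bool) :
    ∀ (l k : List String), (∀ x ∈ k, P x = false) →
    l.foldl (fun a e => if P e = false then a else a.erase e) (k ++ l)
      = k ++ l.filter (fun e => P e = false) := by
  intro l
  induction l with
  | nil => intro k _; simp
  | cons e t ih =>
    intro k hk
    simp only [List.foldl_cons]
    by_cases h : P e = false
    · rw [if_pos h]
      have hk' : ∀ x ∈ k ++ [e], P x = false := by
        intro x hx
        rcases List.mem_append.mp hx with hx | hx
        · exact hk x hx
        · simp at hx; subst hx; exact h
      have h2 : k ++ e :: t = (k ++ [e]) ++ t := by simp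
      rw [h2, ih (k ++ [e]) hk']
      simp [h]
    · have hek : e ∉ k := fun hmem => h (hk e hmem)
      rw [if_neg h, List.erase_append_right _ hek, List.erase_cons_head, ih k hk]
      simp [h]

-- the set-accumulating loop is set(map f (filter P l))
theorem pv_set_loop (P : String → Bool) (f : String → String) :
    ∀ (l : List String) (b : PySem.Set String),
    l.foldl (fun b e => if P e = false then b else PySem.Set.add b (f e)) b
      = ((l.filter P).map f).foldl PySem.Set.add b := by
  intro l
  induction l with
  | nil => intro b; rfl
  | cons e t ih =>
    intro b
    by_cases h : P e = false <;> simp [h, ih]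

-- ===== VERDICT (by name: the statement is the Claim_ definition above) =====
theorem abbreviate_projects_py_spec : Claim_equal_abbreviate_projects_py := by
  intro entries prefix_ _
  unfold Spec_abbreviate_projects_py abbreviate_projects_py abbreviate_projects_py_alt
  simp only
  by_cases hempty : (entries.filter (fun i => PySem.Str.startswith i prefix_)).isEmpty
  · simp only [hempty, if_true]
  · set es := entries.filter (fun i => PySem.Str.startswith i prefix_) with hes
    simp only [hempty, if_false, Bool.false_eq_true]
    rw [pv_cp_eq es]
    rw [pv_fold_split es (fun e => PySem.Chars.isIn [':'] (e.toList.drop (pvZipPrefix ((PySem.List.min? es (fun x => x)).getD "").toList ((PySem.List.max? es (fun x => x)).getD "").toList).length))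
        (fun e => String.ofList ((pvZipPrefix ((PySem.List.min? es (fun x => x)).getD "").toList ((PySem.List.max? es (fun x => x)).getD "").toList) ++ (PySem.Chars.splitOn (e.toList.drop (pvZipPrefix ((PySem.List.min? es (fun x => x)).getD "").toList ((PySem.List.max? es (fun x => x)).getD "").toList).length) [':']).headD [] ++ [':'])) es PySem.Set.empty]
    have h1 := pv_erase_loop (fun e => PySem.Chars.isIn [':'] (e.toList.drop (pvZipPrefix ((PySem.List.min? es (fun x => x)).getD "").toList ((PySem.List.max? es (fun x => x)).getD "").toList).length)) es [] (by simp)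
    simp only [List.nil_append] at h1
    rw [h1]
    rw [pv_set_loop (fun e => PySem.Chars.isIn [':'] (e.toList.drop (pvZipPrefix ((PySem.List.min? es (fun x => x)).getD "").toList ((PySem.List.max? es (fun x => x)).getD "").toList).length))
        (fun e => String.ofList ((pvZipPrefix ((PySem.List.min? es (fun x => x)).getD "").toList ((PySem.List.max? es (fun x => x)).getD "").toList) ++ (PySem.Chars.splitOn (e.toList.drop (pvZipPrefix ((PySem.List.min? es (fun x => x)).getD "").toList ((PySem.List.max? es (fun x => x)).getD "").toList).length) [':']).headD [] ++ [':'])) es PySem.Set.empty]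
    rw [PySem.Set.ofList_eq_foldl]
    rfl
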